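-- pv_equiv track=rewrite | github.com/MXET-DAGGR/VALE-2.0 | Code/extraFiles/newOdometry.py | localizedAngle
-- ===== SOURCE A (Python) =====
-- def localizedAngle(theta):
--     if theta >= 0:
--         while theta >= 180:
--             theta = theta - 180
--         return (theta)
--     if theta <= 0:
--         while theta <= -180:
--             theta = theta + 180
--         return (theta)
-- ===== SOURCE B (Python) =====
-- def localizedAngle(theta):
--     if theta >= 0:
--         return theta % 180
--     return -(-theta % 180)
-- ===== Notes on version B (the rewrite author's own statement) =====
-- stated objective: faster
-- what changed: Replaces the two subtract/add-180 while-loops with a constant-time closed form using Python's % (plain mod for non-negative theta, negated mod of -theta for negative theta).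
import Mathlib
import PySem

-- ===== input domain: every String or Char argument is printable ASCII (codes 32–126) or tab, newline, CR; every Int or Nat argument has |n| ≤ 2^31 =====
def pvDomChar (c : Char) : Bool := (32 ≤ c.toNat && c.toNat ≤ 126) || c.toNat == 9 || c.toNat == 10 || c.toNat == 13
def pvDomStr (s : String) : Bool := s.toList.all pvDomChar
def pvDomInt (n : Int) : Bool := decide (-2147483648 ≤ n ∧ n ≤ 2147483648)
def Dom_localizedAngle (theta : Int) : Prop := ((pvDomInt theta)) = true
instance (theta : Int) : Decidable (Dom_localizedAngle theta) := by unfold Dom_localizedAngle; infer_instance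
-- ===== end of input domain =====

-- B replaces A's repeated ±180 loops with a constant-time closed form via Python's % operator.

-- ===== PORT A =====
-- 'while theta >= 180: theta -= 180'
def pyLoopDown (t : Int) : Int :=
  if 180 ≤ t then pyLoopDown (t - 180) else t
termination_by t.toNat
decreasing_by omega

-- 'while theta <= -180: theta += 180'
def pyLoopUp (t : Int) : Int :=
  if t ≤ -180 then pyLoopUp (t + 180) else t
termination_by (-t).toNat
decreasing_by omega

def localizedAngle (theta : Int) : Int :=
  if 0 ≤ theta then pyLoopDown theta
  else if theta ≤ 0 then pyLoopUp theta
  else 0  -- unreachable (Python would fall through returning None)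

-- ===== PORT B =====
def localizedAngle_alt (theta : Int) : Int :=
  if 0 ≤ theta then PySem.Int.mod theta 180
  else -(PySem.Int.mod (-theta) 180)

-- ===== PRECONDITION & SPEC =====
def Spec_localizedAngle (theta : Int) (out : Int) : Prop := out = localizedAngle_alt theta
instance (theta : Int) (out : Int) : Decidable (Spec_localizedAngle theta out) := by unfold Spec_localizedAngle; infer_instance

-- ===== CLAIM (what is proved, stated in full; the proofs are below) =====
def Claim_equal_localizedAngle : Prop := ∀ (theta : Int), Dom_localizedAngle theta → Spec_localizedAngle theta (localizedAngle theta)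

-- ===== LEMMAS AND PROOFS =====
lemma pyLoopDown_eq_aux : ∀ (n : Nat) (t : Int), 0 ≤ t → t.toNat ≤ n → pyLoopDown t = t % 180 := by
  intro n
  induction n with
  | zero =>
      intro t ht hle
      have : t = 0 := by omega
      subst this
      rw [pyLoopDown]; norm_num
  | succ n ih =>
      intro t ht hle
      rw [pyLoopDown]
      split_ifs with h
      · have := ih (t - 180) (by omega) (by omega)
        omega
      · omega

lemma pyLoopDown_eq (t : Int) (ht : 0 ≤ t) : pyLoopDown t = t % 180 :=
  pyLoopDown_eq_aux t.toNat t ht le_rfl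

lemma pyLoopUp_eq_aux : ∀ (n : Nat) (t : Int), t ≤ 0 → (-t).toNat ≤ n → pyLoopUp t = -((-t) % 180) := by
  intro n
  induction n with
  | zero =>
      intro t ht hle
      have : t = 0 := by omega
      subst this
      rw [pyLoopUp]; norm_num
  | succ n ih =>
      intro t ht hle
      rw [pyLoopUp]
      split_ifs with h
      · have := ih (t + 180) (by omega) (by omega)
        omega
      · omega

lemma pyLoopUp_eq (t : Int) (ht : t ≤ 0) : pyLoopUp t = -((-t) % 180) :=
  pyLoopUp_eq_aux (-t).toNat t ht le_rfl

-- ===== VERDICT (by name: the statement is the Claim_ definition above) =====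
theorem localizedAngle_spec : Claim_equal_localizedAngle := by
  intro theta _
  unfold Spec_localizedAngle localizedAngle localizedAngle_alt
  rw [PySem.Int.mod_eq_emod_of_pos (by norm_num : (0:Int) < 180),
      PySem.Int.mod_eq_emod_of_pos (by norm_num : (0:Int) < 180)]
  split_ifs with h h2
  · exact pyLoopDown_eq theta h
  · exact pyLoopUp_eq theta h2
  · omega
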